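-- pv_equiv track=rewrite | github.com/NahimMora/Universidad | Programacion_Numerica/raicesPolinomios.py | coeficiente_negativo_max
-- ===== SOURCE A (Python) =====
-- def coeficiente_negativo_max(P):
--
--     n = len(P)
--
--     k = -1
--     A = 0
--
--     for i in range(1, n):
--         if  P[i] < 0:
--             if k == -1: k = i
--
--             if A < abs(P[i]): A = abs(P[i])
--     return k, A
-- ===== SOURCE B (Python) =====
-- def coeficiente_negativo_max(P):
--     def solve(lo, hi):
--         # divide and conquer over the index interval [lo, hi)
--         if hi - lo <= 0:
--             return -1, 0
--         if hi - lo == 1: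
--             v = P[lo]
--             return (lo, -v) if v < 0 else (-1, 0)
--         mid = (lo + hi) // 2
--         kl, al = solve(lo, mid)
--         kr, ar = solve(mid, hi)
--         return (kl if kl != -1 else kr), max(al, ar)
--     return solve(1, len(P))
-- ===== Notes on version B (the rewrite author's own statement) =====
-- stated objective: alternative
-- what changed: Replaces A's single left-to-right accumulator loop by a divide-and-conquer recursion on the index interval [1, len(P)): each half is solved independently and the results are merged (left-preferred first index, max of the two maxima).
import Mathlib
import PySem

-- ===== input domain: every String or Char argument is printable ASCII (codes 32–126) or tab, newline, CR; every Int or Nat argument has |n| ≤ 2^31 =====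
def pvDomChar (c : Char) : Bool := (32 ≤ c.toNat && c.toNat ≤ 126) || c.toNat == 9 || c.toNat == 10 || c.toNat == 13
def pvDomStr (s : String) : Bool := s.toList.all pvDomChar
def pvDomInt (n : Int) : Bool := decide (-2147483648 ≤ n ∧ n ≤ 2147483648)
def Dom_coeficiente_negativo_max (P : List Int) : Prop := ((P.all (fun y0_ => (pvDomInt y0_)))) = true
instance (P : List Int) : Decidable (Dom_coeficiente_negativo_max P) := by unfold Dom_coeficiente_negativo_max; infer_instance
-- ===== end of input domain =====

-- B solves the task by divide and conquer on the index interval [1, len P): each half is solved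
-- independently and merged (left-preferred first negative index, max of the two maxima), instead
-- of A's single left-to-right accumulator loop (objective: alternative).

-- ===== PORT A =====
def coeficiente_negativo_max (P : List Int) : Int × Int :=
  (PySem.List.pyRange 1 P.length 1).foldl
    (fun s i =>
      let v := (PySem.List.pyGet? P i).getD 0
      if v < 0 then
        ((if s.1 = -1 then i else s.1), (if s.2 < |v| then |v| else s.2))
      else s)
    (-1, 0)

-- ===== PORT B =====
-- divide-and-conquer helper of Source B: solve(lo, hi) over the index interval [lo, hi)
-- (the Nat fuel only makes the recursion structural; it is never exhausted when fuel ≥ hi - lo)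
def cnmSolve (P : List Int) : Nat → Int → Int → Int × Int
  | 0, _, _ => (-1, 0)
  | fuel + 1, lo, hi =>
    if hi - lo ≤ 0 then (-1, 0)
    else if hi - lo = 1 then
      let v := (PySem.List.pyGet? P lo).getD 0
      if v < 0 then (lo, -v) else (-1, 0)
    else
      let mid := PySem.Int.floordiv (lo + hi) 2
      let l := cnmSolve P fuel lo mid
      let r := cnmSolve P fuel mid hi
      ((if l.1 ≠ -1 then l.1 else r.1), max l.2 r.2)

def coeficiente_negativo_max_alt (P : List Int) : Int × Int :=
  cnmSolve P P.length 1 P.length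

-- ===== PRECONDITION & SPEC =====
def Spec_coeficiente_negativo_max (P : List Int) (out : Int × Int) : Prop := out = coeficiente_negativo_max_alt P
instance (P : List Int) (out : Int × Int) : Decidable (Spec_coeficiente_negativo_max P out) := by unfold Spec_coeficiente_negativo_max; infer_instance

-- ===== CLAIM (what is proved, stated in full; the proofs are below) =====
def Claim_equal_coeficiente_negativo_max : Prop := ∀ (P : List Int), Dom_coeficiente_negativo_max P → Spec_coeficiente_negativo_max P (coeficiente_negativo_max P)

-- ===== LEMMAS AND PROOFS =====

-- reference form: the negative positions of [lo, hi), their first element (or -1), and the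
-- running max of their absolute values
def cnmNegs (P : List Int) (lo hi : Int) : List Int :=
  (PySem.List.pyRange lo hi 1).filter (fun i => decide ((PySem.List.pyGet? P i).getD 0 < 0))

def cnmFirst (L : List Int) : Int := match L with | [] => -1 | j :: _ => j

def cnmMax (P : List Int) (L : List Int) : Int :=
  (L.map (fun i => |(PySem.List.pyGet? P i).getD 0|)).foldl max 0

-- Invariant of A's loop over any index list whose elements are never -1.
theorem pv_loop_eq (P : List Int) :
    ∀ (L : List Int) (k A : Int), (∀ i ∈ L, i ≠ -1) →
    L.foldl
      (fun s i =>
        let v := (PySem.List.pyGet? P i).getD 0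
        if v < 0 then
          ((if s.1 = -1 then i else s.1), (if s.2 < |v| then |v| else s.2))
        else s)
      (k, A)
    =
    ((if k = -1 then
        cnmFirst (L.filter (fun i => decide ((PySem.List.pyGet? P i).getD 0 < 0)))
      else k),
     ((L.filter (fun i => decide ((PySem.List.pyGet? P i).getD 0 < 0))).map
        (fun i => |(PySem.List.pyGet? P i).getD 0|)).foldl max A) := by
  intro L
  induction L with
  | nil => intro k A _; simp [cnmFirst]
  | cons i L ih =>
    intro k A h
    have hi : i ≠ -1 := h i (List.mem_cons_self ..)
    have hL : ∀ j ∈ L, j ≠ -1 := fun j hj => h j (List.mem_cons_of_mem _ hj)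
    by_cases hv : (PySem.List.pyGet? P i).getD 0 < 0
    · have hmax : (if A < |(PySem.List.pyGet? P i).getD 0| then |(PySem.List.pyGet? P i).getD 0| else A)
          = max A |(PySem.List.pyGet? P i).getD 0| := by
        rcases le_or_gt |(PySem.List.pyGet? P i).getD 0| A with hle | hlt
        · rw [if_neg (not_lt.mpr hle), max_eq_left hle]
        · rw [if_pos hlt, max_eq_right (le_of_lt hlt)]
      simp only [List.foldl_cons, List.filter_cons, hv, decide_true, if_true, List.map_cons]
      rw [hmax, ih _ _ hL]
      by_cases hk : k = -1
      · simp [hk, hi, cnmFirst]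
      · simp [hk]
    · simp only [List.foldl_cons, List.filter_cons, hv, decide_false]
      exact ih _ _ hL

theorem pv_range_ne_neg_one (P : List Int) : ∀ i ∈ PySem.List.pyRange 1 P.length 1, i ≠ -1 := by
  intro i hi
  have := (PySem.List.mem_pyRange_one).mp hi
  omega

theorem foldl_max_max (a b : Int) : ∀ (L : List Int), L.foldl max (max a b) = max a (L.foldl max b) := by
  intro L
  induction L generalizing a b with
  | nil => simp
  | cons x t ih => simp only [List.foldl_cons, max_assoc, ih]

theorem le_foldl_max (a : Int) (L : List Int) : a ≤ L.foldl max a := by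
  induction L generalizing a with
  | nil => simp
  | cons x t ih => exact le_trans (le_max_left a x) (ih _)

theorem cnmMax_append (P : List Int) (X Y : List Int) :
    cnmMax P (X ++ Y) = max (cnmMax P X) (cnmMax P Y) := by
  unfold cnmMax
  rw [List.map_append, List.foldl_append]
  have h0 : (0 : Int) ≤ (X.map (fun i => |(PySem.List.pyGet? P i).getD 0|)).foldl max 0 :=
    le_foldl_max 0 _
  calc (Y.map (fun i => |(PySem.List.pyGet? P i).getD 0|)).foldl max
          ((X.map (fun i => |(PySem.List.pyGet? P i).getD 0|)).foldl max 0)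
      = (Y.map (fun i => |(PySem.List.pyGet? P i).getD 0|)).foldl max
          (max ((X.map (fun i => |(PySem.List.pyGet? P i).getD 0|)).foldl max 0) 0) := by
        rw [max_eq_left h0]
    _ = _ := by rw [foldl_max_max]

theorem cnmNegs_append (P : List Int) (lo mid hi : Int) (h1 : lo ≤ mid) (h2 : mid ≤ hi) :
    cnmNegs P lo hi = cnmNegs P lo mid ++ cnmNegs P mid hi := by
  unfold cnmNegs
  rw [PySem.List.pyRange_one_append lo mid hi h1 h2, List.filter_append]

theorem cnmNegs_pos (P : List Int) (lo hi : Int) (hlo : 1 ≤ lo) :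
    ∀ j ∈ cnmNegs P lo hi, 1 ≤ j := by
  intro j hj
  have := (PySem.List.mem_pyRange_one).mp (List.mem_of_mem_filter hj)
  omega

-- characterization of B's divide-and-conquer helper
theorem cnmSolve_eq (P : List Int) :
    ∀ (fuel : Nat) (lo hi : Int), (hi - lo).toNat ≤ fuel → 1 ≤ lo →
      cnmSolve P fuel lo hi = (cnmFirst (cnmNegs P lo hi), cnmMax P (cnmNegs P lo hi)) := by
  intro fuel
  induction fuel with
  | zero =>
    intro lo hi hn hlo
    have : PySem.List.pyRange lo hi 1 = [] := PySem.List.pyRange_one_eq_nil (by omega)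
    simp [cnmSolve, cnmNegs, this, cnmFirst, cnmMax]
  | succ fuel ih =>
    intro lo hi hn hlo
    rw [cnmSolve]
    by_cases h0 : hi - lo ≤ 0
    · have : PySem.List.pyRange lo hi 1 = [] := PySem.List.pyRange_one_eq_nil (by omega)
      simp [h0, cnmNegs, this, cnmFirst, cnmMax]
    · by_cases h1 : hi - lo = 1
      · have hhi : hi = lo + 1 := by omega
        have hr : PySem.List.pyRange lo hi 1 = [lo] := by
          rw [hhi]; exact PySem.List.pyRange_one_singleton lo
        simp only [if_neg h0, if_pos h1]
        by_cases hv : (PySem.List.pyGet? P lo).getD 0 < 0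
        · have habs : |(PySem.List.pyGet? P lo).getD 0| = -((PySem.List.pyGet? P lo).getD 0) :=
            abs_of_neg hv
          simp [hv, cnmNegs, hr, cnmFirst, cnmMax, habs, max_eq_right (by omega : (0:Int) ≤ -((PySem.List.pyGet? P lo).getD 0))]
        · simp [hv, cnmNegs, hr, cnmFirst, cnmMax]
      · simp only [if_neg h0, if_neg h1]
        have hmid : lo ≤ PySem.Int.floordiv (lo + hi) 2 ∧ PySem.Int.floordiv (lo + hi) 2 ≤ hi ∧
            lo < PySem.Int.floordiv (lo + hi) 2 ∧ PySem.Int.floordiv (lo + hi) 2 < hi := by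
          rw [PySem.Int.floordiv_eq_ediv_of_pos (by omega)]
          omega
        obtain ⟨hm1, hm2, hm3, hm4⟩ := hmid
        set mid := PySem.Int.floordiv (lo + hi) 2 with hmdef
        rw [ih mid hi (by omega) (by omega), ih lo mid (by omega) hlo]
        rw [cnmNegs_append P lo mid hi hm1 hm2, cnmMax_append]
        refine Prod.ext ?_ rfl
        simp only
        cases hX : cnmNegs P lo mid with
        | nil => simp [cnmFirst]
        | cons j t =>
          have hj : 1 ≤ j := cnmNegs_pos P lo mid hlo j (by rw [hX]; exact List.mem_cons_self ..)
          simp only [cnmFirst]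
          rw [if_pos (by omega : j ≠ -1)]
          simp [List.cons_append]

-- ===== VERDICT (by name: the statement is the Claim_ definition above) =====
theorem coeficiente_negativo_max_spec : Claim_equal_coeficiente_negativo_max := by
  intro P _
  unfold Spec_coeficiente_negativo_max coeficiente_negativo_max coeficiente_negativo_max_alt
  rw [pv_loop_eq P _ _ _ (pv_range_ne_neg_one P),
      cnmSolve_eq P P.length 1 P.length (by omega) le_rfl]
  simp [cnmNegs, cnmMax]
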